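-- pv_equiv track=rewrite | github.com/retardedjames/redbot-cogs | wordle/wordle.py | _letter_states
-- ===== SOURCE A (Python) =====
-- def _letter_states(guesses: list) -> dict:
--     """
--     Return a dict mapping each guessed letter to its best colour state.
--     Priority: green > yellow > gray.
--     """
--     priority = {"green": 3, "yellow": 2, "gray": 1}
--     states: dict = {}
--     for word, colours in guesses:
--         for letter, colour in zip(word, colours):
--             if priority[colour] > priority.get(states.get(letter), 0):
--                 states[letter] = colour
--     return states
-- ===== SOURCE B (Python) =====
-- def _letter_states(guesses: list) -> dict:
--     """
--     Return a dict mapping each guessed letter to its best colour state.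
--     Priority: green > yellow > gray.
--     Two-phase: gather every colour seen per letter, then reduce with max.
--     """
--     priority = {"green": 3, "yellow": 2, "gray": 1}
--     occ: dict = {}
--     for word, colours in guesses:
--         for letter, colour in zip(word, colours):
--             occ.setdefault(letter, []).append(colour)
--     return {letter: max(cs, key=lambda c: priority[c]) for letter, cs in occ.items()}
-- ===== Notes on version B (the rewrite author's own statement) =====
-- stated objective: alternative
-- what changed: Replaces the online compare-and-overwrite dict update with a two-phase gather (letter -> list of colours seen, in first-appearance order) followed by a per-letter reduce with max over the priority key.
import Mathlib
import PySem

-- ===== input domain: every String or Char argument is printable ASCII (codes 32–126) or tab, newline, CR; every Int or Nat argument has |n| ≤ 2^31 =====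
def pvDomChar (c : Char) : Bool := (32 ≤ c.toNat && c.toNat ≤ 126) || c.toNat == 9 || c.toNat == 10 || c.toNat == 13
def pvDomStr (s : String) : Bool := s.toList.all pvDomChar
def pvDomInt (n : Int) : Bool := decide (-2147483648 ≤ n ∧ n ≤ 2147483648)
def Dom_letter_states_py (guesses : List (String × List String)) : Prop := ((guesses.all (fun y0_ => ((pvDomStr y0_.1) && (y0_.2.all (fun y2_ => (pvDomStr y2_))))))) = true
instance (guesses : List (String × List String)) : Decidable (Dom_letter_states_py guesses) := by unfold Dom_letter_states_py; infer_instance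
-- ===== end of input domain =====

-- B gathers all colours per letter into an index dict in one pass, then reduces each
-- letter's list with a priority-keyed max (alternative decomposition, same cost).

-- ===== PORT A =====
-- the priority dict literal shared by both Pythons
def pvPriority : PySem.Dict String Int :=
  PySem.Dict.ofList [("green", 3), ("yellow", 2), ("gray", 1)]

-- iterating a Python string yields its 1-character strings
def pvLetters (w : String) : List String := w.toList.map (fun c => String.ofList [c])

def letter_states_py (guesses : List (String × List String)) : List (String × String) :=
  (guesses.foldl (fun states wc =>
      ((pvLetters wc.1).zip wc.2).foldl (fun states lc =>
        if pvPriority.getD lc.2 0 >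
            (match states.get? lc.1 with
             | none => (0 : Int)
             | some s => pvPriority.getD s 0)
        then states.insert lc.1 lc.2 else states) states)
    (PySem.Dict.empty : PySem.Dict String String)).items

-- ===== PORT B =====
def letter_states_py_alt (guesses : List (String × List String)) : List (String × String) :=
  ((guesses.foldl (fun occ wc =>
      ((pvLetters wc.1).zip wc.2).foldl (fun occ lc =>
        occ.modify lc.1 [] (· ++ [lc.2])) occ)
    (PySem.Dict.empty : PySem.Dict String (List String))).items).map
    (fun p => (p.1, (PySem.List.max? p.2 (fun c => pvPriority.getD c 0)).getD ""))

-- ===== PRECONDITION & SPEC =====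
-- Pre_ excludes exactly the inputs where Python A raises KeyError: a colour actually
-- paired with a letter by zip (i.e. among the first len(word) colours) that is not
-- one of "green"/"yellow"/"gray".
def Pre_letter_states_py (guesses : List (String × List String)) : Prop :=
  ∀ wc ∈ guesses, ∀ c ∈ wc.2.take wc.1.length, c ∈ (["green", "yellow", "gray"] : List String)
instance (guesses : List (String × List String)) : Decidable (Pre_letter_states_py guesses) := by unfold Pre_letter_states_py; infer_instance
def pvWitness_letter_states_py : (List (String × List String)) := [("abca", ["green", "gray", "yellow"])]

def Spec_letter_states_py (guesses : List (String × List String)) (out : List (String × String)) : Prop := out = letter_states_py_alt guesses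
instance (guesses : List (String × List String)) (out : List (String × String)) : Decidable (Spec_letter_states_py guesses out) := by unfold Spec_letter_states_py; infer_instance

-- ===== CLAIM (what is proved, stated in full; the proofs are below) =====
def Claim_equal_letter_states_py : Prop := ∀ (guesses : List (String × List String)), Dom_letter_states_py guesses → Pre_letter_states_py guesses → Spec_letter_states_py guesses (letter_states_py guesses)

-- ===== LEMMAS AND PROOFS =====

-- the letter/colour pairs both loops range over, flattened
def pvPairs (guesses : List (String × List String)) : List (String × String) :=
  guesses.flatMap (fun wc => (pvLetters wc.1).zip wc.2)

-- A's loop body as a step function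
def pvStepA (states : PySem.Dict String String) (lc : String × String) : PySem.Dict String String :=
  if pvPriority.getD lc.2 0 >
      (match states.get? lc.1 with
       | none => (0 : Int)
       | some s => pvPriority.getD s 0)
  then states.insert lc.1 lc.2 else states

-- B's gather-loop body as a step function
def pvStepB (occ : PySem.Dict String (List String)) (lc : String × String) : PySem.Dict String (List String) :=
  occ.modify lc.1 [] (· ++ [lc.2])

-- B's reduce phase
def pvFm (p : String × List String) : String × String :=
  (p.1, (PySem.List.max? p.2 (fun c => pvPriority.getD c 0)).getD "")

lemma pvA_eq (gs : List (String × List String)) :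
    letter_states_py gs = ((pvPairs gs).foldl pvStepA PySem.Dict.empty).items := by
  unfold letter_states_py pvPairs pvStepA
  rw [List.foldl_flatMap]

lemma pvB_eq (gs : List (String × List String)) :
    letter_states_py_alt gs = (((pvPairs gs).foldl pvStepB PySem.Dict.empty).items).map pvFm := by
  unfold letter_states_py_alt pvPairs pvStepB pvFm
  rw [List.foldl_flatMap]

lemma pvZipSndMemTake {alpha beta : Type} (xs : List alpha) (ys : List beta) (p : alpha × beta)
    (h : p ∈ xs.zip ys) : p.2 ∈ ys.take xs.length := by
  induction xs generalizing ys with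
  | nil => simp at h
  | cons x xt ih =>
    cases ys with
    | nil => simp at h
    | cons y yt =>
      simp only [List.zip_cons_cons, List.mem_cons] at h
      rcases h with h | h
      · subst h; simp
      · simpa using Or.inr (ih yt h)

lemma pvPrPos {c : String} (h : c ∈ (["green", "yellow", "gray"] : List String)) :
    1 ≤ pvPriority.getD c 0 := by
  fin_cases h <;> decide

lemma pvMaxAppend (xs : List String) (x : String) (key : String → Int) :
    PySem.List.max? (xs ++ [x]) key
      = (match PySem.List.max? xs key with
         | none => some x
         | some m => if key m < key x then some x else some m) := by
  cases h : PySem.List.max? xs key with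
  | none =>
    unfold PySem.List.max? at h ⊢
    rw [List.foldl_append, h]
    rfl
  | some m =>
    unfold PySem.List.max? at h ⊢
    rw [List.foldl_append, h]
    rfl

lemma pvGetRel (states : PySem.Dict String String) (occ : PySem.Dict String (List String))
    (hrel : states.items = occ.items.map pvFm) (k : String) :
    states.get? k = (occ.get? k).map (fun cs => (PySem.List.max? cs (fun c => pvPriority.getD c 0)).getD "") := by
  simp only [PySem.Dict.get?, hrel, List.find?_map]
  cases h : List.find? (fun p => p.1 == k) occ.items with
  | none =>
    have : List.find? ((fun p => p.1 == k) ∘ pvFm) occ.items = none := by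
      rw [← h]; congr 1
    simp [this]
  | some q =>
    have : List.find? ((fun p => p.1 == k) ∘ pvFm) occ.items = some q := by
      rw [← h]; congr 1
    simp [this, pvFm]

lemma pvContainsRel (states : PySem.Dict String String) (occ : PySem.Dict String (List String))
    (hrel : states.items = occ.items.map pvFm) (k : String) :
    states.contains k = occ.contains k := by
  simp only [PySem.Dict.contains, hrel, List.any_map]
  congr 1

lemma pvNodupUnique {alpha beta : Type} [DecidableEq alpha] (l : List (alpha × beta))
    (hnd : (l.map Prod.fst).Nodup) {k : alpha} {v : beta} (hm : (k, v) ∈ l)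
    {p : alpha × beta} (hp : p ∈ l) (hk : p.1 = k) : p = (k, v) := by
  induction l with
  | nil => simp at hm
  | cons a t ih =>
    simp only [List.map_cons, List.nodup_cons] at hnd
    rcases List.mem_cons.mp hp with hpa | hpt
    · rcases List.mem_cons.mp hm with hma | hmt
      · rw [hpa, ← hma]
      · exfalso
        apply hnd.1
        have hak : a.1 = k := by rw [hpa] at hk; exact hk
        rw [hak]
        exact List.mem_map_of_mem (f := Prod.fst) hmt
    · rcases List.mem_cons.mp hm with hma | hmt
      · exfalso
        apply hnd.1
        have hak : a.1 = k := by rw [← hma]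
        rw [hak, ← hk]
        exact List.mem_map_of_mem (f := Prod.fst) hpt
      · exact ih hnd.2 hmt hpt

lemma pvMain (pairs : List (String × String)) (states : PySem.Dict String String)
    (occ : PySem.Dict String (List String))
    (hnd : occ.keys.Nodup)
    (hrel : states.items = occ.items.map pvFm)
    (hpre : ∀ p ∈ pairs, p.2 ∈ (["green", "yellow", "gray"] : List String)) :
    (pairs.foldl pvStepA states).items = ((pairs.foldl pvStepB occ).items).map pvFm := by
  induction pairs generalizing states occ with
  | nil => exact hrel
  | cons p t ih =>
    obtain ⟨l, c⟩ := p
    have hc : c ∈ (["green", "yellow", "gray"] : List String) := hpre (l, c) (by simp)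
    simp only [List.foldl_cons]
    have hget := pvGetRel states occ hrel l
    have hcon := pvContainsRel states occ hrel l
    have hndkeys : (occ.items.map Prod.fst).Nodup := hnd
    -- the B step is an insert
    have hBstep : pvStepB occ (l, c) = occ.insert l (occ.getD l [] ++ [c]) := rfl
    cases hocc : occ.get? l with
    | none =>
      -- fresh letter: A inserts (priority > 0), B starts the list [c]
      have hcf : occ.contains l = false := (PySem.Dict.get?_eq_none_iff_contains occ l).mp hocc
      have hscf : states.contains l = false := by rw [hcon]; exact hcf
      have hsg : states.get? l = none := by rw [hget, hocc]; rfl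
      have hAstep : pvStepA states (l, c) = states.insert l c := by
        unfold pvStepA
        rw [if_pos]
        simp only [hsg]
        have := pvPrPos hc
        omega
      have hgd : occ.getD l [] = [] := PySem.Dict.getD_of_not_contains occ [] hcf
      apply ih
      · exact PySem.Dict.nodup_keys_insert _ _ _ hnd
      · rw [hAstep, hBstep, hgd,
            PySem.Dict.items_insert_of_not_contains states c hscf,
            PySem.Dict.items_insert_of_not_contains occ ([] ++ [c]) hcf]
        simp [hrel, pvFm, PySem.List.max?]
      · exact fun q hq => hpre q (List.mem_cons_of_mem _ hq)
    | some cs =>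
      have hmem : (l, cs) ∈ occ.items := PySem.Dict.mem_items_of_get?_eq_some occ hocc
      have hct : occ.contains l = true := by
        rcases hb : occ.contains l
        · rw [← PySem.Dict.get?_eq_none_iff_contains] at hb
          rw [hocc] at hb; cases hb
        · rfl
      have hsct : states.contains l = true := by rw [hcon]; exact hct
      have hsg : states.get? l
          = some ((PySem.List.max? cs (fun c => pvPriority.getD c 0)).getD "") := by
        rw [hget, hocc]; rfl
      have hgd : occ.getD l [] = cs := by
        rw [PySem.Dict.getD_eq_get?_getD, hocc]; rfl
      have hBitems : (pvStepB occ (l, c)).items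
          = occ.items.map (fun q => if (q.1 == l) = true then (l, cs ++ [c]) else q) := by
        rw [hBstep, hgd, PySem.Dict.items_insert_of_contains occ (cs ++ [c]) hct]
      set fm : String := (PySem.List.max? cs (fun c => pvPriority.getD c 0)).getD "" with hfm
      by_cases hcond : pvPriority.getD c 0 > pvPriority.getD fm 0
      · -- A overwrites; the appended colour wins the max
        have hAstep : pvStepA states (l, c) = states.insert l c := by
          unfold pvStepA
          rw [if_pos]
          simp only [hsg]
          exact hcond
        apply ih
        · show ((pvStepB occ (l, c)).items.map Prod.fst).Nodup
          rw [hBstep]; exact PySem.Dict.nodup_keys_insert _ _ _ hnd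
        · rw [hAstep, PySem.Dict.items_insert_of_contains states c hsct, hrel, hBitems,
              List.map_map, List.map_map]
          apply List.map_congr_left
          intro q hq
          by_cases hql : q.1 = l
          · have hq' : q = (l, cs) := pvNodupUnique occ.items hndkeys hmem hq hql
            subst hq'
            simp only [Function.comp_apply, pvFm, beq_self_eq_true, if_pos]
            rw [pvMaxAppend]
            cases hmx : PySem.List.max? cs (fun c => pvPriority.getD c 0) with
            | none => simp
            | some m =>
              have : fm = m := by rw [hfm, hmx]; rfl
              rw [this] at hcond
              simp [hcond]
          · simp [pvFm, hql]
        · exact fun q hq => hpre q (List.mem_cons_of_mem _ hq)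
      · -- A keeps the stored colour; the old max survives the append
        have hAstep : pvStepA states (l, c) = states := by
          unfold pvStepA
          rw [if_neg]
          simp only [hsg]
          exact hcond
        apply ih
        · show ((pvStepB occ (l, c)).items.map Prod.fst).Nodup
          rw [hBstep]; exact PySem.Dict.nodup_keys_insert _ _ _ hnd
        · rw [hAstep, hrel, hBitems, List.map_map]
          apply List.map_congr_left
          intro q hq
          by_cases hql : q.1 = l
          · have hq' : q = (l, cs) := pvNodupUnique occ.items hndkeys hmem hq hql
            subst hq'
            simp only [Function.comp_apply, pvFm, beq_self_eq_true, if_pos]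
            rw [pvMaxAppend]
            cases hmx : PySem.List.max? cs (fun c => pvPriority.getD c 0) with
            | none =>
              have hfm0 : fm = "" := by rw [hfm, hmx]; rfl
              rw [hfm0] at hcond
              have := pvPrPos hc
              exfalso
              have h0 : pvPriority.getD "" 0 = 0 := by decide
              rw [h0] at hcond
              omega
            | some m =>
              have hfmm : fm = m := by rw [hfm, hmx]; rfl
              rw [hfmm] at hcond
              have : ¬ pvPriority.getD m 0 < pvPriority.getD c 0 := by omega
              simp [this]
          · simp [pvFm, hql]
        · exact fun q hq => hpre q (List.mem_cons_of_mem _ hq)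

lemma pvPreFlat (guesses : List (String × List String)) (h : Pre_letter_states_py guesses) :
    ∀ p ∈ pvPairs guesses, p.2 ∈ (["green", "yellow", "gray"] : List String) := by
  intro p hp
  simp only [pvPairs, List.mem_flatMap] at hp
  obtain ⟨wc, hwc, hz⟩ := hp
  have := pvZipSndMemTake _ _ _ hz
  have hlen : (pvLetters wc.1).length = wc.1.length := by
    unfold pvLetters
    rw [List.length_map, String.length_toList]
  rw [hlen] at this
  exact h wc hwc p.2 this

-- ===== VERDICT (by name: the statement is the Claim_ definition above) =====
theorem letter_states_py_spec : Claim_equal_letter_states_py := by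
  intro guesses _ hpre
  show letter_states_py guesses = letter_states_py_alt guesses
  rw [pvA_eq, pvB_eq]
  exact pvMain _ _ _ PySem.Dict.nodup_keys_empty rfl (pvPreFlat guesses hpre)
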